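-- pv_equiv track=rewrite | github.com/wipash/KubeCodeRun | scripts/load_test/config.py | get_vm_type
-- ===== SOURCE A (Python) =====
-- from typing import Dict, List, Tuple
--
-- AZURE_VM_TYPES: Dict[Tuple[int, int], str] = {
--     (2, 4): "Standard_D2s_v3",
--     (2, 8): "Standard_D2s_v3",
--     (4, 8): "Standard_D4s_v3",
--     (4, 16): "Standard_D4s_v3",
--     (8, 16): "Standard_D8s_v3",
--     (8, 32): "Standard_D8s_v3",
--     (16, 32): "Standard_D16s_v3",
--     (16, 64): "Standard_D16s_v3",
--     (32, 64): "Standard_D32s_v3",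
--     (32, 128): "Standard_D32s_v3",
--     (48, 96): "Standard_D48s_v3",
--     (64, 128): "Standard_D64s_v3",
-- }
--
-- AWS_INSTANCE_TYPES: Dict[Tuple[int, int], str] = {
--     (2, 4): "m5.large",
--     (2, 8): "m5.large",
--     (4, 8): "m5.xlarge",
--     (4, 16): "m5.xlarge",
--     (8, 16): "m5.2xlarge",
--     (8, 32): "m5.2xlarge",
--     (16, 32): "m5.4xlarge",
--     (16, 64): "m5.4xlarge",
--     (32, 64): "m5.8xlarge",
--     (32, 128): "m5.8xlarge",
--     (48, 96): "m5.12xlarge",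
--     (64, 128): "m5.16xlarge",
-- }
--
-- GCP_MACHINE_TYPES: Dict[Tuple[int, int], str] = {
--     (2, 4): "n2-standard-2",
--     (2, 8): "n2-standard-2",
--     (4, 8): "n2-standard-4",
--     (4, 16): "n2-standard-4",
--     (8, 16): "n2-standard-8",
--     (8, 32): "n2-standard-8",
--     (16, 32): "n2-standard-16",
--     (16, 64): "n2-standard-16",
--     (32, 64): "n2-standard-32",
--     (32, 128): "n2-standard-32",
--     (48, 96): "n2-standard-48",
--     (64, 128): "n2-standard-64",
-- }
--
-- def get_vm_type(
--     cpu_cores: int,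
--     memory_gb: int,
--     provider: str = "azure"
-- ) -> str:
--     """Get recommended VM type for given resources."""
--     vm_maps = {
--         "azure": AZURE_VM_TYPES,
--         "aws": AWS_INSTANCE_TYPES,
--         "gcp": GCP_MACHINE_TYPES,
--     }
--
--     vm_map = vm_maps.get(provider.lower(), AZURE_VM_TYPES)
--
--     # Find the smallest VM that meets requirements
--     candidates = []
--     for (cores, memory), vm_type in vm_map.items():
--         if cores >= cpu_cores and memory >= memory_gb:
--             candidates.append((cores, memory, vm_type))
--
--     if not candidates:
--         # Return largest available
--         max_key = max(vm_map.keys(), key=lambda x: (x[0], x[1]))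
--         return vm_map[max_key]
--
--     # Return smallest that meets requirements
--     candidates.sort(key=lambda x: (x[0], x[1]))
--     return candidates[0][2]
-- ===== SOURCE B (Python) =====
-- _TIERS = [2, 4, 8, 16, 32, 48, 64]
--
--
-- def _vm_name(key, cores):
--     """Synthesize the provider-specific VM name for a core-count tier."""
--     if key == "gcp":
--         return "n2-standard-" + str(cores)
--     if key == "aws":
--         if cores == 2:
--             return "m5.large"
--         if cores == 4:
--             return "m5.xlarge"
--         return "m5." + str(cores // 4) + "xlarge"
--     return "Standard_D" + str(cores) + "s_v3"
--
--
-- def get_vm_type(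
--     cpu_cores: int,
--     memory_gb: int,
--     provider: str = "azure"
-- ) -> str:
--     """Get recommended VM type for given resources.
--
--     Every tier with `cores` cores offers up to 4*cores GB of memory
--     (2*cores for the 48- and 64-core tiers), and the VM name depends only
--     on the provider and the core count, so the smallest adequate table
--     entry is found by scanning the seven core tiers with an arithmetic
--     capacity test and synthesizing the name -- no table at all.
--     """
--     key = provider.lower()
--     for cores in _TIERS:
--         cap = 4 * cores if cores <= 32 else 2 * cores
--         if cores >= cpu_cores and cap >= memory_gb:
--             return _vm_name(key, cores)
--     # Nothing is big enough: largest available tier.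
--     return _vm_name(key, 64)
-- ===== Notes on version B (the rewrite author's own statement) =====
-- stated objective: simpler
-- what changed: B discards the lookup tables entirely: it scans the seven core tiers with an arithmetic capacity test (4*cores GB, or 2*cores for the 48/64-core tiers) and synthesizes the provider-specific VM name from the core count, instead of A's filter-the-dict / build-candidates / sort / take-first with a max()-keyed fallback lookup.
import Mathlib
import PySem

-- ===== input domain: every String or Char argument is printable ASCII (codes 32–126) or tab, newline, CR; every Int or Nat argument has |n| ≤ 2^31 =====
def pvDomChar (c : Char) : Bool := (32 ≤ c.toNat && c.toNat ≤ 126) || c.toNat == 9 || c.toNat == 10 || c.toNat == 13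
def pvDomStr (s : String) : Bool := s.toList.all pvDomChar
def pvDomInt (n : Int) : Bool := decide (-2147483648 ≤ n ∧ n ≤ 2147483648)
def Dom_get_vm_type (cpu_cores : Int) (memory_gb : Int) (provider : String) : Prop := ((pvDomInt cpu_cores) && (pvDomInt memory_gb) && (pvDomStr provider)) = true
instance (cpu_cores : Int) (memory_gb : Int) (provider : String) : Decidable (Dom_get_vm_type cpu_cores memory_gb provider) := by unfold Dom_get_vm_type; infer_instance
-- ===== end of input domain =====

-- B drops the lookup tables entirely: every tier with c cores offers up to 4*c GB
-- (2*c for the 48/64-core tiers) and the VM name is determined by provider and core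
-- count alone, so B scans the seven core tiers with an arithmetic capacity test and
-- synthesizes the name (objective: simpler — no table, no candidate list, no sort).

-- ===== PORT A =====
def AZURE_VM_TYPES : PySem.Dict (Int × Int) String := PySem.Dict.ofList
  [((2, 4), "Standard_D2s_v3"), ((2, 8), "Standard_D2s_v3"),
   ((4, 8), "Standard_D4s_v3"), ((4, 16), "Standard_D4s_v3"),
   ((8, 16), "Standard_D8s_v3"), ((8, 32), "Standard_D8s_v3"),
   ((16, 32), "Standard_D16s_v3"), ((16, 64), "Standard_D16s_v3"),
   ((32, 64), "Standard_D32s_v3"), ((32, 128), "Standard_D32s_v3"),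
   ((48, 96), "Standard_D48s_v3"), ((64, 128), "Standard_D64s_v3")]

def AWS_INSTANCE_TYPES : PySem.Dict (Int × Int) String := PySem.Dict.ofList
  [((2, 4), "m5.large"), ((2, 8), "m5.large"),
   ((4, 8), "m5.xlarge"), ((4, 16), "m5.xlarge"),
   ((8, 16), "m5.2xlarge"), ((8, 32), "m5.2xlarge"),
   ((16, 32), "m5.4xlarge"), ((16, 64), "m5.4xlarge"),
   ((32, 64), "m5.8xlarge"), ((32, 128), "m5.8xlarge"),
   ((48, 96), "m5.12xlarge"), ((64, 128), "m5.16xlarge")]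

def GCP_MACHINE_TYPES : PySem.Dict (Int × Int) String := PySem.Dict.ofList
  [((2, 4), "n2-standard-2"), ((2, 8), "n2-standard-2"),
   ((4, 8), "n2-standard-4"), ((4, 16), "n2-standard-4"),
   ((8, 16), "n2-standard-8"), ((8, 32), "n2-standard-8"),
   ((16, 32), "n2-standard-16"), ((16, 64), "n2-standard-16"),
   ((32, 64), "n2-standard-32"), ((32, 128), "n2-standard-32"),
   ((48, 96), "n2-standard-48"), ((64, 128), "n2-standard-64")]

def pvVmMaps : PySem.Dict String (PySem.Dict (Int × Int) String) := PySem.Dict.ofList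
  [("azure", AZURE_VM_TYPES), ("aws", AWS_INSTANCE_TYPES), ("gcp", GCP_MACHINE_TYPES)]

def get_vm_type (cpu_cores : Int) (memory_gb : Int) (provider : String) : String :=
  let vm_map := pvVmMaps.getD (PySem.Str.lower provider) AZURE_VM_TYPES
  let candidates := vm_map.items.foldl
    (fun acc kv => if kv.1.1 ≥ cpu_cores ∧ kv.1.2 ≥ memory_gb
                   then acc ++ [(kv.1.1, kv.1.2, kv.2)] else acc) []
  if candidates = [] then
    -- max(vm_map.keys(), key=lambda x: (x[0], x[1])); the keys list is nonempty, so
    -- max2? is some and the final dict lookup hits (the "" defaults are unreachable)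
    match PySem.List.max2? vm_map.keys (fun x => x.1) (fun x => x.2) with
    | some k => (vm_map.get? k).getD ""
    | none => ""
  else
    -- candidates.sort(key=lambda x: (x[0], x[1])); candidates[0][2]
    match PySem.List.sorted2 candidates (fun x => x.1) (fun x => x.2.1) with
    | c :: _ => c.2.2
    | [] => ""

-- ===== PORT B =====
def pvTiers : List Int := [2, 4, 8, 16, 32, 48, 64]

def pvVmName (key : String) (cores : Int) : String :=
  if key == "gcp" then "n2-standard-" ++ PySem.Int.toStr cores
  else if key == "aws" then
    if cores == 2 then "m5.large"
    else if cores == 4 then "m5.xlarge"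
    else "m5." ++ PySem.Int.toStr (PySem.Int.floordiv cores 4) ++ "xlarge"
  else "Standard_D" ++ PySem.Int.toStr cores ++ "s_v3"

def get_vm_type_alt (cpu_cores : Int) (memory_gb : Int) (provider : String) : String :=
  let key := PySem.Str.lower provider
  -- 'for cores in _TIERS: if cores >= cpu and cap >= mem: return name' = find?
  match pvTiers.find? (fun cores =>
      decide (cores ≥ cpu_cores) &&
      decide ((if cores ≤ 32 then 4 * cores else 2 * cores) ≥ memory_gb)) with
  | some cores => pvVmName key cores
  | none => pvVmName key 64

-- ===== PRECONDITION & SPEC =====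
def Spec_get_vm_type (cpu_cores : Int) (memory_gb : Int) (provider : String) (out : String) : Prop := out = get_vm_type_alt cpu_cores memory_gb provider
instance (cpu_cores : Int) (memory_gb : Int) (provider : String) (out : String) : Decidable (Spec_get_vm_type cpu_cores memory_gb provider out) := by unfold Spec_get_vm_type; infer_instance

-- ===== CLAIM (what is proved, stated in full; the proofs are below) =====
def Claim_equal_get_vm_type : Prop := ∀ (cpu_cores : Int) (memory_gb : Int) (provider : String), Dom_get_vm_type cpu_cores memory_gb provider → Spec_get_vm_type cpu_cores memory_gb provider (get_vm_type cpu_cores memory_gb provider)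

-- ===== LEMMAS AND PROOFS =====

-- find? respects pointwise-equal predicates (no such lemma in Mathlib/PySem).
theorem pvFind?_congr {α : Type} (l : List α) (p q : α → Bool) (h : ∀ x ∈ l, p x = q x) :
    l.find? p = l.find? q := by
  induction l with
  | nil => rfl
  | cons x xs ih =>
    have hx := h x List.mem_cons_self
    simp only [List.find?_cons, hx]
    cases q x
    · exact ih fun y hy => h y (List.mem_cons_of_mem _ hy)
    · rfl

-- Proof-only views of the two bodies with the provider choice factored out.
def pvA (tbl : PySem.Dict (Int × Int) String) (cpu_cores memory_gb : Int) : String :=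
  let candidates := tbl.items.foldl
    (fun acc kv => if kv.1.1 ≥ cpu_cores ∧ kv.1.2 ≥ memory_gb
                   then acc ++ [(kv.1.1, kv.1.2, kv.2)] else acc) []
  if candidates = [] then
    match PySem.List.max2? tbl.keys (fun x => x.1) (fun x => x.2) with
    | some k => (tbl.get? k).getD ""
    | none => ""
  else
    match PySem.List.sorted2 candidates (fun x => x.1) (fun x => x.2.1) with
    | c :: _ => c.2.2
    | [] => ""

def pvB (key : String) (cpu_cores memory_gb : Int) : String :=
  match pvTiers.find? (fun cores =>
      decide (cores ≥ cpu_cores) &&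
      decide ((if cores ≤ 32 then 4 * cores else 2 * cores) ≥ memory_gb)) with
  | some cores => pvVmName key cores
  | none => pvVmName key 64

theorem get_vm_type_eq_pvA (c m : Int) (p : String) :
    get_vm_type c m p = pvA (pvVmMaps.getD (PySem.Str.lower p) AZURE_VM_TYPES) c m := rfl

theorem get_vm_type_alt_eq_pvB (c m : Int) (p : String) :
    get_vm_type_alt c m p = pvB (PySem.Str.lower p) c m := rfl

-- Representatives: the programs only see cpu/mem through comparisons with table constants.
def pvRepC (cpu : Int) : Int :=
  if cpu ≤ 2 then 2 else if cpu ≤ 4 then 4 else if cpu ≤ 8 then 8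
  else if cpu ≤ 16 then 16 else if cpu ≤ 32 then 32 else if cpu ≤ 48 then 48
  else if cpu ≤ 64 then 64 else 65

def pvRepM (mem : Int) : Int :=
  if mem ≤ 4 then 4 else if mem ≤ 8 then 8 else if mem ≤ 16 then 16
  else if mem ≤ 32 then 32 else if mem ≤ 64 then 64 else if mem ≤ 96 then 96
  else if mem ≤ 128 then 128 else 129

def pvMems : List Int := [4, 8, 16, 32, 64, 96, 128]

theorem pvRepC_pres (c cpu : Int) (hc : c ∈ pvTiers) : (c ≥ cpu ↔ c ≥ pvRepC cpu) := by
  fin_cases hc <;> (unfold pvRepC; split_ifs <;> omega)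

theorem pvRepM_pres (m mem : Int) (hm : m ∈ pvMems) : (m ≥ mem ↔ m ≥ pvRepM mem) := by
  fin_cases hm <;> (unfold pvRepM; split_ifs <;> omega)

theorem pvRepC_mem (cpu : Int) : pvRepC cpu ∈ ([2, 4, 8, 16, 32, 48, 64, 65] : List Int) := by
  unfold pvRepC; split_ifs <;> simp

theorem pvRepM_mem (mem : Int) : pvRepM mem ∈ ([4, 8, 16, 32, 64, 96, 128, 129] : List Int) := by
  unfold pvRepM; split_ifs <;> simp

def pvKeys : List (Int × Int) :=
  [(2,4),(2,8),(4,8),(4,16),(8,16),(8,32),(16,32),(16,64),(32,64),(32,128),(48,96),(64,128)]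

theorem pvCond_rep (l : List ((Int × Int) × String))
    (hk : ∀ kv ∈ l, kv.1 ∈ pvKeys) (cpu mem : Int) :
    ∀ kv ∈ l, ((kv.1.1 ≥ cpu ∧ kv.1.2 ≥ mem) ↔
               (kv.1.1 ≥ pvRepC cpu ∧ kv.1.2 ≥ pvRepM mem)) := by
  intro kv hkv
  have h := hk kv hkv
  simp only [pvKeys, List.mem_cons, List.not_mem_nil, or_false] at h
  obtain ⟨⟨a, b⟩, v⟩ := kv
  rcases h with ⟨rfl, rfl⟩ | ⟨rfl, rfl⟩ | ⟨rfl, rfl⟩ | ⟨rfl, rfl⟩ | ⟨rfl, rfl⟩ | ⟨rfl, rfl⟩ |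
    ⟨rfl, rfl⟩ | ⟨rfl, rfl⟩ | ⟨rfl, rfl⟩ | ⟨rfl, rfl⟩ | ⟨rfl, rfl⟩ | ⟨rfl, rfl⟩ <;>
    exact and_congr (pvRepC_pres _ _ (by simp [pvTiers])) (pvRepM_pres _ _ (by simp [pvMems]))

theorem pvA_congr (tbl : PySem.Dict (Int × Int) String) (cpu mem : Int)
    (hk : ∀ kv ∈ tbl.items, kv.1 ∈ pvKeys) :
    pvA tbl cpu mem = pvA tbl (pvRepC cpu) (pvRepM mem) := by
  unfold pvA
  rw [PySem.List.foldl_append_ite (fun kv => kv.1.1 ≥ cpu ∧ kv.1.2 ≥ mem)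
        (fun kv => (kv.1.1, kv.1.2, kv.2)) tbl.items [],
      PySem.List.foldl_append_ite (fun kv => kv.1.1 ≥ pvRepC cpu ∧ kv.1.2 ≥ pvRepM mem)
        (fun kv => (kv.1.1, kv.1.2, kv.2)) tbl.items []]
  have hf : tbl.items.filter (fun kv => decide (kv.1.1 ≥ cpu ∧ kv.1.2 ≥ mem)) =
      tbl.items.filter (fun kv => decide (kv.1.1 ≥ pvRepC cpu ∧ kv.1.2 ≥ pvRepM mem)) :=
    List.filter_congr (fun kv hkv => by
      exact decide_eq_decide.mpr (pvCond_rep tbl.items hk cpu mem kv hkv))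
  rw [hf]

theorem pvB_congr (key : String) (cpu mem : Int) :
    pvB key cpu mem = pvB key (pvRepC cpu) (pvRepM mem) := by
  unfold pvB
  have hf : pvTiers.find? (fun cores =>
        decide (cores ≥ cpu) &&
        decide ((if cores ≤ 32 then 4 * cores else 2 * cores) ≥ mem)) =
      pvTiers.find? (fun cores =>
        decide (cores ≥ pvRepC cpu) &&
        decide ((if cores ≤ 32 then 4 * cores else 2 * cores) ≥ pvRepM mem)) := by
    apply pvFind?_congr
    intro c hc
    fin_cases hc <;>
      · norm_num
        rw [decide_eq_decide.mpr (pvRepC_pres _ cpu (by decide)),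
            decide_eq_decide.mpr (pvRepM_pres _ mem (by decide))]
  rw [hf]

theorem pvTable_eq (tbl : PySem.Dict (Int × Int) String) (key : String)
    (hk : ∀ kv ∈ tbl.items, kv.1 ∈ pvKeys)
    (hrep : ∀ a ∈ ([2, 4, 8, 16, 32, 48, 64, 65] : List Int),
            ∀ b ∈ ([4, 8, 16, 32, 64, 96, 128, 129] : List Int),
            pvA tbl a b = pvB key a b)
    (cpu mem : Int) : pvA tbl cpu mem = pvB key cpu mem := by
  rw [pvA_congr tbl cpu mem hk, pvB_congr key cpu mem]
  exact hrep _ (pvRepC_mem cpu) _ (pvRepM_mem mem)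

theorem get_vm_type_eq_alt (c m : Int) (p : String) :
    get_vm_type c m p = get_vm_type_alt c m p := by
  rw [get_vm_type_eq_pvA, get_vm_type_alt_eq_pvB]
  by_cases haws : PySem.Str.lower p = "aws"
  · rw [haws]
    exact pvTable_eq AWS_INSTANCE_TYPES "aws" (by decide) (by decide) c m
  · by_cases hgcp : PySem.Str.lower p = "gcp"
    · rw [hgcp]
      exact pvTable_eq GCP_MACHINE_TYPES "gcp" (by decide) (by decide) c m
    · have hmap : pvVmMaps.getD (PySem.Str.lower p) AZURE_VM_TYPES = AZURE_VM_TYPES := by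
        by_cases haz : PySem.Str.lower p = "azure"
        · rw [haz]; decide
        · have hitems : pvVmMaps.items =
              [("azure", AZURE_VM_TYPES), ("aws", AWS_INSTANCE_TYPES), ("gcp", GCP_MACHINE_TYPES)] := by
            decide
          have b1 : (("azure":String) == PySem.Str.lower p) = false := beq_eq_false_iff_ne.mpr (Ne.symm haz)
          have b2 : (("aws":String) == PySem.Str.lower p) = false := beq_eq_false_iff_ne.mpr (Ne.symm haws)
          have b3 : (("gcp":String) == PySem.Str.lower p) = false := beq_eq_false_iff_ne.mpr (Ne.symm hgcp)
          simp [PySem.Dict.getD, PySem.Dict.get?, hitems, List.find?, b1, b2, b3]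
      rw [hmap]
      have hname : ∀ cores : Int, pvVmName (PySem.Str.lower p) cores =
          "Standard_D" ++ PySem.Int.toStr cores ++ "s_v3" := by
        intro cores
        unfold pvVmName
        rw [if_neg (by simpa using hgcp), if_neg (by simpa using haws)]
      have hB : pvB (PySem.Str.lower p) c m = pvB "azure" c m := by
        unfold pvB
        cases pvTiers.find? (fun cores =>
            decide (cores ≥ c) &&
            decide ((if cores ≤ 32 then 4 * cores else 2 * cores) ≥ m)) with
        | none => rw [hname]; rfl
        | some k => simp only [hname]; rfl
      rw [hB]
      exact pvTable_eq AZURE_VM_TYPES "azure" (by decide) (by decide) c m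

-- ===== VERDICT (by name: the statement is the Claim_ definition above) =====
theorem get_vm_type_spec : Claim_equal_get_vm_type := by
  intro c m p _
  unfold Spec_get_vm_type
  exact get_vm_type_eq_alt c m p
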